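-- pv_equiv track=rewrite | github.com/francedirectjp-art/astro-medical-system-s | app.py | translate_to_japanese
-- ===== SOURCE A (Python) =====
-- def translate_to_japanese(text):
--     """英語の占星術用語を日本語に変換"""
--     translations = {
--         # 星座名
--         'Aries': '牡羊座', 'Taurus': '牡牛座', 'Gemini': '双子座', 'Cancer': '蟹座',
--         'Leo': '獅子座', 'Virgo': '乙女座', 'Libra': '天秤座', 'Scorpio': '蠍座',
--         'Sagittarius': '射手座', 'Capricorn': '山羊座', 'Aquarius': '水瓶座', 'Pisces': '魚座',
--
--         # 四元素
--         'Fire': '火', 'Earth': '地', 'Air': '風', 'Water': '水',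
--
--         # 天体名
--         'Sun': '太陽', 'Moon': '月', 'Mercury': '水星', 'Venus': '金星',
--         'Mars': '火星', 'Jupiter': '木星', 'Saturn': '土星'
--     }
--
--     result = text
--     for eng, jpn in translations.items():
--         result = result.replace(eng, jpn)
--     return result
-- ===== SOURCE B (Python) =====
-- def translate_to_japanese(text):
--     """英語の占星術用語を日本語に変換 — single left-to-right scan instead of 23 full-string replace passes"""
--     table = (
--         ('Aries', '牡羊座'), ('Taurus', '牡牛座'), ('Gemini', '双子座'), ('Cancer', '蟹座'),
--         ('Leo', '獅子座'), ('Virgo', '乙女座'), ('Libra', '天秤座'), ('Scorpio', '蠍座'),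
--         ('Sagittarius', '射手座'), ('Capricorn', '山羊座'), ('Aquarius', '水瓶座'), ('Pisces', '魚座'),
--         ('Fire', '火'), ('Earth', '地'), ('Air', '風'), ('Water', '水'),
--         ('Sun', '太陽'), ('Moon', '月'), ('Mercury', '水星'), ('Venus', '金星'),
--         ('Mars', '火星'), ('Jupiter', '木星'), ('Saturn', '土星'))
--     out = []
--     i = 0
--     n = len(text)
--     while i < n:
--         for eng, jpn in table:
--             if text.startswith(eng, i):
--                 out.append(jpn)
--                 i += len(eng)
--                 break
--         else:
--             out.append(text[i])
--             i += 1
--     return ''.join(out)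
-- ===== Notes on version B (the rewrite author's own statement) =====
-- stated objective: alternative
-- what changed: Replaces A's 23 sequential full-string replace passes with one left-to-right scan that at each position tries the translation keys and emits either the Japanese translation or the untouched character; correct because no key occurs inside another key or inside any inserted Japanese text, so the single pass finds exactly the occurrences the sequential replaces would.
import Mathlib
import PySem

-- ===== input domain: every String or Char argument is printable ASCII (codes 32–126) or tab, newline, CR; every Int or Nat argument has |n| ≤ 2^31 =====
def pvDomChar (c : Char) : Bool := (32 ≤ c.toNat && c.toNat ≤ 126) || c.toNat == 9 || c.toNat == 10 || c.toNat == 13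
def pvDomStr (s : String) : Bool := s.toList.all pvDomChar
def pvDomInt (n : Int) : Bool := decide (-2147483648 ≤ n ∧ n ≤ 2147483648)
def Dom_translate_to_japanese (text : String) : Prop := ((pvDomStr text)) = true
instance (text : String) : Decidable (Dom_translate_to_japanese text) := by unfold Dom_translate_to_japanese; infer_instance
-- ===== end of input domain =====

-- B replaces A's 23 sequential full-string `replace` passes by ONE left-to-right scan that tries the
-- translation keys at each position (alternative decomposition, same results; no speed claim).

-- ===== PORT A =====
-- the translations dict of A, in insertion order
def pvTableS : List (String × String) :=
  [("Aries", "牡羊座"), ("Taurus", "牡牛座"), ("Gemini", "双子座"), ("Cancer", "蟹座"),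
   ("Leo", "獅子座"), ("Virgo", "乙女座"), ("Libra", "天秤座"), ("Scorpio", "蠍座"),
   ("Sagittarius", "射手座"), ("Capricorn", "山羊座"), ("Aquarius", "水瓶座"), ("Pisces", "魚座"),
   ("Fire", "火"), ("Earth", "地"), ("Air", "風"), ("Water", "水"),
   ("Sun", "太陽"), ("Moon", "月"), ("Mercury", "水星"), ("Venus", "金星"),
   ("Mars", "火星"), ("Jupiter", "木星"), ("Saturn", "土星")]

-- A: result = text; for eng, jpn in translations.items(): result = result.replace(eng, jpn)
def translate_to_japanese (text : String) : String :=
  pvTableS.foldl (fun result p => PySem.Str.replace result p.1 p.2) text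

-- ===== PORT B =====
-- B's table of (eng, jpn) pairs; B scans character by character, so both sides are kept as char lists
def pvTable : List (List Char × List Char) :=
  [(['A', 'r', 'i', 'e', 's'], ['牡', '羊', '座']),
   (['T', 'a', 'u', 'r', 'u', 's'], ['牡', '牛', '座']),
   (['G', 'e', 'm', 'i', 'n', 'i'], ['双', '子', '座']),
   (['C', 'a', 'n', 'c', 'e', 'r'], ['蟹', '座']),
   (['L', 'e', 'o'], ['獅', '子', '座']),
   (['V', 'i', 'r', 'g', 'o'], ['乙', '女', '座']),
   (['L', 'i', 'b', 'r', 'a'], ['天', '秤', '座']),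
   (['S', 'c', 'o', 'r', 'p', 'i', 'o'], ['蠍', '座']),
   (['S', 'a', 'g', 'i', 't', 't', 'a', 'r', 'i', 'u', 's'], ['射', '手', '座']),
   (['C', 'a', 'p', 'r', 'i', 'c', 'o', 'r', 'n'], ['山', '羊', '座']),
   (['A', 'q', 'u', 'a', 'r', 'i', 'u', 's'], ['水', '瓶', '座']),
   (['P', 'i', 's', 'c', 'e', 's'], ['魚', '座']),
   (['F', 'i', 'r', 'e'], ['火']),
   (['E', 'a', 'r', 't', 'h'], ['地']),
   (['A', 'i', 'r'], ['風']),
   (['W', 'a', 't', 'e', 'r'], ['水']),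
   (['S', 'u', 'n'], ['太', '陽']),
   (['M', 'o', 'o', 'n'], ['月']),
   (['M', 'e', 'r', 'c', 'u', 'r', 'y'], ['水', '星']),
   (['V', 'e', 'n', 'u', 's'], ['金', '星']),
   (['M', 'a', 'r', 's'], ['火', '星']),
   (['J', 'u', 'p', 'i', 't', 'e', 'r'], ['木', '星']),
   (['S', 'a', 't', 'u', 'r', 'n'], ['土', '星'])]

-- inner `for eng, jpn in table: if text.startswith(eng, i): … break / else: …`
def pvTryKeys : List (List Char × List Char) → List Char → Option ((List Char × List Char) × List Char)
  | [], _ => none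
  | pq :: ks, s => if pq.1.isPrefixOf s then some (pq, s.drop pq.1.length) else pvTryKeys ks s

set_option maxRecDepth 4096 in
theorem pvTable_keys_neB : pvTable.all (fun pq => !pq.1.isEmpty) = true := by decide

theorem pvTable_keys_ne : ∀ pq ∈ pvTable, pq.1 ≠ [] := by
  have h := pvTable_keys_neB
  simp only [List.all_eq_true, Bool.not_eq_eq_eq_not, Bool.not_true, List.isEmpty_eq_false_iff] at h
  exact h

-- cited by pvScan's termination proof
theorem pvTryKeys_lt : ∀ (ks : List (List Char × List Char)), (∀ pq ∈ ks, pq.1 ≠ []) →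
    ∀ (c : Char) (rest : List Char) pq r, pvTryKeys ks (c :: rest) = some (pq, r) →
    r.length < (c :: rest).length := by
  intro ks hne c rest pq r h
  induction ks with
  | nil => simp [pvTryKeys] at h
  | cons pq0 ks ih =>
    simp only [pvTryKeys] at h
    split at h
    · simp only [Option.some.injEq, Prod.mk.injEq] at h
      obtain ⟨h1, h2⟩ := h
      subst h2
      have : pq0.1.length ≠ 0 := by
        simpa using List.length_eq_zero_iff.not.mpr (hne pq0 (by simp))
      simp only [List.length_drop, List.length_cons]
      omega
    · exact ih (fun x hx => hne x (by simp [hx])) h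

-- B: one pass over the text; at each position emit a translation (and skip the key) or the character
def pvScan (s : List Char) : List Char :=
  match s with
  | [] => []
  | c :: rest =>
    match h : pvTryKeys pvTable (c :: rest) with
    | some (pq, r) => pq.2 ++ pvScan r
    | none => c :: pvScan rest
termination_by s.length
decreasing_by
· exact pvTryKeys_lt pvTable pvTable_keys_ne c rest pq r h
· simp

def translate_to_japanese_alt (text : String) : String :=
  String.ofList (pvScan text.toList)

-- ===== PRECONDITION & SPEC =====
def Spec_translate_to_japanese (text : String) (out : String) : Prop := out = translate_to_japanese_alt text
instance (text : String) (out : String) : Decidable (Spec_translate_to_japanese text out) := by unfold Spec_translate_to_japanese; infer_instance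

-- ===== CLAIM (what is proved, stated in full; the proofs are below) =====
def Claim_equal_translate_to_japanese : Prop := ∀ (text : String), Dom_translate_to_japanese text → Spec_translate_to_japanese text (translate_to_japanese text)

-- ===== LEMMAS AND PROOFS =====

set_option maxRecDepth 8192 in
theorem pvTableS_toList : pvTableS.map (fun p => (p.1.toList, p.2.toList)) = pvTable := by decide

theorem pvTryKeys_some_spec : ∀ (ks : List (List Char × List Char)) (s : List Char) pq r,
    pvTryKeys ks s = some (pq, r) → pq ∈ ks ∧ pq.1 <+: s ∧ r = s.drop pq.1.length := by
  intro ks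
  induction ks with
  | nil => intro s pq r h; simp [pvTryKeys] at h
  | cons pq0 ks ih =>
    intro s pq r h
    rw [pvTryKeys] at h
    split at h
    · rename_i hp
      simp only [Option.some.injEq, Prod.mk.injEq] at h
      obtain ⟨h1, h2⟩ := h
      subst h1; subst h2
      exact ⟨by simp, List.isPrefixOf_iff_prefix.mp hp, rfl⟩
    · have := ih s pq r h
      exact ⟨by simp [this.1], this.2.1, this.2.2⟩

theorem pvTryKeys_none_spec : ∀ (ks : List (List Char × List Char)) (s : List Char),
    pvTryKeys ks s = none → ∀ pq ∈ ks, ¬ pq.1 <+: s := by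
  intro ks
  induction ks with
  | nil => intro s _ pq hpq; simp at hpq
  | cons pq0 ks ih =>
    intro s h pq hpq
    rw [pvTryKeys] at h
    split at h
    · simp at h
    · rename_i hp
      rcases List.mem_cons.mp hpq with rfl | hm
      · exact fun hc => hp (List.isPrefixOf_iff_prefix.mpr hc)
      · exact ih s h pq hm

-- conditional unfolding of the scan
theorem pvScan_cons_some {c : Char} {rest : List Char} {pq r}
    (h : pvTryKeys pvTable (c :: rest) = some (pq, r)) :
    pvScan (c :: rest) = pq.2 ++ pvScan r := by
  rw [pvScan]
  split <;> simp_all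

theorem pvScan_cons_none {c : Char} {rest : List Char}
    (h : pvTryKeys pvTable (c :: rest) = none) :
    pvScan (c :: rest) = c :: pvScan rest := by
  rw [pvScan]
  split <;> simp_all

-- tokenisation of the input: each token is either a matched (eng, jpn) table entry or a single char
def pvToks (s : List Char) : List ((List Char × List Char) ⊕ Char) :=
  match s with
  | [] => []
  | c :: rest =>
    match h : pvTryKeys pvTable (c :: rest) with
    | some (pq, r) => Sum.inl pq :: pvToks r
    | none => Sum.inr c :: pvToks rest
termination_by s.length
decreasing_by
· exact pvTryKeys_lt pvTable pvTable_keys_ne c rest pq r h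
· simp

-- render a token list, with the entries in `done` already translated
def pvRender (done : List (List Char × List Char)) :
    List ((List Char × List Char) ⊕ Char) → List Char
  | [] => []
  | Sum.inl pq :: ts => (if pq ∈ done then pq.2 else pq.1) ++ pvRender done ts
  | Sum.inr c :: ts => c :: pvRender done ts

-- well-formed token list: entries come from the table, and no key matches at an unmatched char
def pvWF : List ((List Char × List Char) ⊕ Char) → Prop
  | [] => True
  | Sum.inl pq :: ts => pq ∈ pvTable ∧ pvWF ts
  | Sum.inr c :: ts => (∀ pq ∈ pvTable, ¬ pq.1 <+: (c :: pvRender [] ts)) ∧ pvWF ts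

-- left-to-right non-overlapping replace (structural form of Python's str.replace for old ≠ '')
def pvReplaceL (old new : List Char) (s : List Char) : List Char :=
  match s with
  | [] => []
  | c :: t =>
    if old.isPrefixOf (c :: t) then new ++ pvReplaceL old new (t.drop (old.length - 1))
    else c :: pvReplaceL old new t
termination_by s.length
decreasing_by
· simp only [List.length_drop, List.length_cons]; omega
· simp

theorem pvGo_eq (old new : List Char) (hold : old ≠ []) :
    ∀ (fuel : Nat) (l acc : List Char), l.length ≤ fuel →
      PySem.Chars.replace.go old new fuel l acc = acc.reverse ++ pvReplaceL old new l := by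
  intro fuel
  induction fuel with
  | zero =>
    intro l acc hl
    have : l = [] := by cases l <;> simp_all
    subst this
    simp [PySem.Chars.replace.go, pvReplaceL]
  | succ fuel ih =>
    intro l acc hl
    cases l with
    | nil => simp [PySem.Chars.replace.go, pvReplaceL]
    | cons c t =>
      rw [PySem.Chars.replace.go]
      by_cases hp : old.isPrefixOf (c :: t)
      · rw [if_pos hp]
        obtain ⟨o, os, rfl⟩ : ∃ o os, old = o :: os := by
          cases old with
          | nil => exact absurd rfl hold
          | cons o os => exact ⟨o, os, rfl⟩
        have hdrop : List.drop (o :: os).length (c :: t) = t.drop ((o :: os).length - 1) := by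
          simp [List.length_cons]
        rw [hdrop, ih _ _ (by simp at hl ⊢; omega)]
        conv_rhs => rw [pvReplaceL]
        rw [if_pos hp]
        simp
      · rw [if_neg hp, ih _ _ (by simp at hl ⊢; omega)]
        conv_rhs => rw [pvReplaceL]
        rw [if_neg hp]
        simp

theorem pvReplace_eq (old new s : List Char) (hold : old ≠ []) :
    PySem.Chars.replace s old new = pvReplaceL old new s := by
  rw [PySem.Chars.replace, if_neg (by simpa [List.isEmpty_iff] using hold)]
  simpa using pvGo_eq old new hold s.length s [] le_rfl

def pvNoOcc (e h : List Char) : Prop := ∀ ℓ, ℓ < h.length → ∀ u, ¬ e <+: (h.drop ℓ ++ u)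

theorem pvSkip (e j : List Char) : ∀ (h u : List Char), pvNoOcc e h →
    pvReplaceL e j (h ++ u) = h ++ pvReplaceL e j u := by
  intro h
  induction h with
  | nil => intro u _; simp
  | cons c h' ih =>
    intro u hno
    have h0 : ¬ e <+: (c :: (h' ++ u)) := by simpa using hno 0 (by simp) u
    rw [List.cons_append, pvReplaceL, if_neg (by simpa [List.isPrefixOf_iff_prefix] using h0)]
    have hno' : pvNoOcc e h' := by
      intro ℓ hℓ u'
      simpa using hno (ℓ + 1) (by simp; omega) u'
    rw [ih u hno', List.cons_append]

theorem pvMatch (e j u : List Char) (he : e ≠ []) :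
    pvReplaceL e j (e ++ u) = j ++ pvReplaceL e j u := by
  obtain ⟨o, os, rfl⟩ : ∃ o os, e = o :: os := by
    cases e with
    | nil => exact absurd rfl he
    | cons o os => exact ⟨o, os, rfl⟩
  rw [List.cons_append, pvReplaceL,
    if_pos (by rw [List.isPrefixOf_iff_prefix, ← List.cons_append]; exact List.prefix_append _ _)]
  congr 1
  simp

def pvNoStraddleB (e p : List Char) : Bool :=
  (List.range p.length).all fun ℓ =>
    (List.range e.length).any fun i =>
      decide (ℓ + i < p.length) && decide (p.getD (ℓ + i) ' ' ≠ e.getD i ' ')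

theorem pvNoOcc_of_noStraddleB {e p : List Char} (h : pvNoStraddleB e p = true) : pvNoOcc e p := by
  intro ℓ hℓ u hpre
  simp only [pvNoStraddleB, List.all_eq_true, List.mem_range, List.any_eq_true,
    Bool.and_eq_true, decide_eq_true_eq] at h
  obtain ⟨i, hi, hlt, hne⟩ := h ℓ hℓ
  apply hne
  have hdl : i < (p.drop ℓ).length := by simp [List.length_drop]; omega
  have hlen : i < (p.drop ℓ ++ u).length := by simp [List.length_drop]; omega
  have h1 : e[i]'hi = (p.drop ℓ ++ u)[i]'hlen := List.IsPrefix.getElem hpre hi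
  have h2 : (p.drop ℓ ++ u)[i]'hlen = p[ℓ + i]'(by omega) := by
    rw [List.getElem_append_left hdl, List.getElem_drop]
  rw [List.getD_eq_getElem p ' ' (by omega), List.getD_eq_getElem e ' ' hi]
  exact (h1.trans h2).symm

theorem pvNoOcc_head (eh : Char) (et hh : List Char) (h : ∀ c ∈ hh, c ≠ eh) :
    pvNoOcc (eh :: et) hh := by
  intro ℓ hℓ u hpre
  have hdl : 0 < (hh.drop ℓ).length := by simp [List.length_drop]; omega
  have hlen : 0 < (hh.drop ℓ ++ u).length := by simp [List.length_drop]; omega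
  have h1 : (eh :: et)[0]'(by simp) = (hh.drop ℓ ++ u)[0]'hlen := List.IsPrefix.getElem hpre (by simp)
  have h2 : (hh.drop ℓ ++ u)[0]'hlen = hh[ℓ]'hℓ := by
    rw [List.getElem_append_left hdl, List.getElem_drop]
    simp
  have : eh = hh[ℓ]'hℓ := by simpa using h1.trans h2
  exact h _ (List.getElem_mem hℓ) this.symm

set_option maxRecDepth 4096 in
theorem pvT_asciiB : pvTable.all (fun pq => pq.1.all (fun c => decide (c.toNat < 128))) = true := by decide

theorem pvT_ascii : ∀ pq ∈ pvTable, ∀ c ∈ pq.1, c.toNat < 128 := by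
  have h := pvT_asciiB
  simp only [List.all_eq_true, decide_eq_true_eq] at h
  exact h

set_option maxRecDepth 4096 in
theorem pvT_jpnB : pvTable.all (fun pq => !pq.2.isEmpty && pq.2.all (fun c => decide (128 ≤ c.toNat))) = true := by decide

theorem pvT_jpn : ∀ pq ∈ pvTable, pq.2 ≠ [] ∧ ∀ c ∈ pq.2, 128 ≤ c.toNat := by
  have h := pvT_jpnB
  simp only [List.all_eq_true, Bool.and_eq_true, Bool.not_eq_eq_eq_not, Bool.not_true,
    List.isEmpty_eq_false_iff, decide_eq_true_eq] at h
  exact h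

set_option maxRecDepth 4096 in
theorem pvT_straddle : ∀ pq ∈ pvTable, ∀ pq' ∈ pvTable, pq ≠ pq' →
    pvNoStraddleB pq.1 pq'.1 = true := by decide

set_option maxRecDepth 4096 in
theorem pvT_nodup : pvTable.Nodup := by decide

theorem pvAsciiPrefix (done : List (List Char × List Char)) (hd : ∀ x ∈ done, x ∈ pvTable) :
    ∀ (ts : List ((List Char × List Char) ⊕ Char)) (e' : List Char),
      (∀ c ∈ e', c.toNat < 128) → e' <+: pvRender done ts → e' <+: pvRender [] ts := by
  intro ts
  induction ts with
  | nil => intro e' _ hp; simpa [pvRender] using hp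
  | cons tk ts ih =>
    cases tk with
    | inl pq =>
      intro e' ha hp
      rw [pvRender] at hp
      rw [pvRender, if_neg (List.not_mem_nil)]
      by_cases hm : pq ∈ done
      · rw [if_pos hm] at hp
        cases e' with
        | nil => exact List.nil_prefix
        | cons c e'' =>
          exfalso
          obtain ⟨hq0, hjp⟩ := pvT_jpn pq (hd pq hm)
          obtain ⟨q0, qs, hq⟩ : ∃ q0 qs, pq.2 = q0 :: qs := by
            cases hqq : pq.2 with
            | nil => exact absurd hqq hq0
            | cons a b => exact ⟨a, b, rfl⟩
          rw [hq, List.cons_append] at hp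
          have hce : c = q0 := (List.cons_prefix_cons.mp hp).1
          have hj := hjp q0 (by rw [hq]; simp)
          have hc := ha c (by simp)
          rw [hce] at hc
          omega
      · rw [if_neg hm] at hp
        rcases List.prefix_or_prefix_of_prefix hp (List.prefix_append pq.1 _) with h1 | h1
        · exact h1.trans (List.prefix_append _ _)
        · obtain ⟨e₂, rfl⟩ := h1
          have h3 : e₂ <+: pvRender done ts := (List.prefix_append_right_inj pq.1).mp hp
          have h4 : e₂ <+: pvRender [] ts :=
            ih e₂ (fun x hx => ha x (by simp [hx])) h3
          exact (List.prefix_append_right_inj pq.1).mpr h4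
    | inr c =>
      intro e' ha hp
      rw [pvRender] at hp
      rw [pvRender]
      cases e' with
      | nil => exact List.nil_prefix
      | cons c' e'' =>
        obtain ⟨h1, h2⟩ := List.cons_prefix_cons.mp hp
        exact List.cons_prefix_cons.mpr ⟨h1, ih e'' (fun x hx => ha x (by simp [hx])) h2⟩

theorem pvRep (e jp : List Char) (hmem : (e, jp) ∈ pvTable)
    (done : List (List Char × List Char)) (hd : ∀ x ∈ done, x ∈ pvTable)
    (hnd : (e, jp) ∉ done) :
    ∀ ts, pvWF ts → pvReplaceL e jp (pvRender done ts) = pvRender (done ++ [(e, jp)]) ts := by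
  intro ts
  induction ts with
  | nil => intro _; simp [pvRender, pvReplaceL]
  | cons tk ts ih =>
    cases tk with
    | inl pq =>
      rintro ⟨hpq, hwf⟩
      obtain ⟨e0, os, he0⟩ : ∃ e0 os, e = e0 :: os := by
        have h := pvTable_keys_ne (e, jp) hmem
        cases e with
        | nil => exact absurd rfl h
        | cons a b => exact ⟨a, b, rfl⟩
      by_cases h1 : pq ∈ done
      · rw [pvRender, if_pos h1, pvRender, if_pos (by simp [h1])]
        rw [pvSkip e jp pq.2 _ ?_, ih hwf]
        rw [he0]
        apply pvNoOcc_head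
        intro c hc hEq
        have h128 := (pvT_jpn pq (hd pq h1)).2 c hc
        have hA := pvT_ascii (e, jp) hmem e0 (by rw [he0]; simp)
        rw [hEq] at h128
        omega
      · by_cases h2 : pq = (e, jp)
        · subst h2
          rw [pvRender, if_neg h1, pvRender, if_pos (by simp)]
          rw [pvMatch e jp _ (by rw [he0]; simp), ih hwf]
        · rw [pvRender, if_neg h1, pvRender, if_neg (by simp [h1, h2])]
          rw [pvSkip e jp pq.1 _
            (pvNoOcc_of_noStraddleB (pvT_straddle (e, jp) hmem pq hpq (fun hh => h2 hh.symm))),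
            ih hwf]
    | inr c =>
      rintro ⟨hocc, hwf⟩
      have hnp : ¬ e <+: (c :: pvRender done ts) := by
        intro hp
        have h := pvAsciiPrefix done hd (Sum.inr c :: ts) e (pvT_ascii (e, jp) hmem)
          (by simpa [pvRender] using hp)
        exact hocc (e, jp) hmem (by simpa [pvRender] using h)
      rw [pvRender, pvRender, pvReplaceL,
        if_neg (by simpa [List.isPrefixOf_iff_prefix] using hnp), ih hwf]

theorem pvRender_nil_toks : ∀ s, pvRender [] (pvToks s) = s := by
  intro s
  fun_induction pvToks s with
  | case1 => simp [pvRender]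
  | case2 c rest pq r h ih =>
    obtain ⟨hmem, hpre, hr⟩ := pvTryKeys_some_spec pvTable _ pq r h
    rw [pvRender, if_neg (List.not_mem_nil), ih]
    rw [hr]
    exact List.prefix_iff_eq_append.mp hpre
  | case3 c rest h ih =>
    rw [pvRender, ih]

theorem pvWF_toks : ∀ s, pvWF (pvToks s) := by
  intro s
  fun_induction pvToks s with
  | case1 => trivial
  | case2 c rest pq r h ih =>
    exact ⟨(pvTryKeys_some_spec pvTable _ pq r h).1, ih⟩
  | case3 c rest h ih =>
    refine ⟨?_, ih⟩
    intro pq hpq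
    rw [pvRender_nil_toks rest]
    exact pvTryKeys_none_spec pvTable _ h pq hpq

theorem pvScan_eq_render : ∀ s, pvScan s = pvRender pvTable (pvToks s) := by
  intro s
  fun_induction pvToks s with
  | case1 => simp [pvScan, pvRender]
  | case2 c rest pq r h ih =>
    have hmem := (pvTryKeys_some_spec pvTable _ pq r h).1
    rw [pvScan_cons_some h, pvRender, if_pos hmem, ih]
  | case3 c rest h ih =>
    rw [pvScan_cons_none h, pvRender, ih]

theorem pvFold : ∀ (ks done : List (List Char × List Char)), done ++ ks = pvTable →
    ∀ ts, pvWF ts →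
      List.foldl (fun acc pq => pvReplaceL pq.1 pq.2 acc) (pvRender done ts) ks =
        pvRender pvTable ts := by
  intro ks
  induction ks with
  | nil =>
    intro done h ts _
    rw [List.append_nil] at h
    rw [h]
    rfl
  | cons pq ks ih =>
    intro done h ts hwf
    rw [List.foldl_cons]
    have hmem : pq ∈ pvTable := by rw [← h]; simp
    have hd : ∀ x ∈ done, x ∈ pvTable := fun x hx => by rw [← h]; simp [hx]
    have hnd : pq ∉ done := by
      have hn := pvT_nodup
      rw [← h] at hn
      rcases List.nodup_append.mp hn with ⟨_, _, hdisj⟩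
      intro hc
      exact hdisj pq hc pq (by simp) rfl
    have step : pvReplaceL pq.1 pq.2 (pvRender done ts) = pvRender (done ++ [pq]) ts :=
      pvRep pq.1 pq.2 hmem done hd hnd ts hwf
    rw [step, ih (done ++ [pq]) (by rw [List.append_assoc]; simpa using h) ts hwf]

theorem pvA_toList (ps : List (String × String)) (s : String) :
    (ps.foldl (fun r p => PySem.Str.replace r p.1 p.2) s).toList =
      List.foldl (fun acc pq => PySem.Chars.replace acc pq.1 pq.2) s.toList
        (ps.map (fun p => (p.1.toList, p.2.toList))) := by
  induction ps generalizing s with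
  | nil => simp
  | cons p ps ih =>
    simp only [List.foldl_cons, List.map_cons]
    rw [ih, PySem.Str.toList_replace]

-- ===== VERDICT (by name: the statement is the Claim_ definition above) =====
theorem translate_to_japanese_spec : Claim_equal_translate_to_japanese := by
  intro text _
  unfold Spec_translate_to_japanese translate_to_japanese translate_to_japanese_alt
  refine String.toList_inj.mp ?_
  rw [pvA_toList, String.toList_ofList]
  rw [pvTableS_toList]
  rw [PySem.List.foldl_congr_mem pvTable _ (fun acc pq => pvReplaceL pq.1 pq.2 acc) text.toList
    (fun acc pq hpq => pvReplace_eq pq.1 pq.2 acc (pvTable_keys_ne pq hpq))]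
  conv_lhs => rw [← pvRender_nil_toks text.toList]
  rw [pvFold pvTable [] rfl _ (pvWF_toks text.toList), ← pvScan_eq_render]
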